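-- pv_equiv track=rewrite | github.com/NoelKirthiraj/sourcing-agent | dashboard_data.py | compute_streak
-- ===== SOURCE A (Python) =====
-- def compute_streak(history: list[dict]) -> tuple[int, int]:
--     """Return (current_streak, best_streak) of consecutive zero-error runs."""
--     current = 0
--     best = 0
--     for run in reversed(history):
--         if run.get("error_count", 0) == 0:
--             current += 1
--         else:
--             break
--     streak = 0
--     for run in history:
--         if run.get("error_count", 0) == 0:
--             streak += 1
--             best = max(best, streak)
--         else:
--             streak = 0
--     return current, best
-- ===== SOURCE B (Python) =====
-- def compute_streak(history: list[dict]) -> tuple[int, int]: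
--     """Return (current_streak, best_streak) of consecutive zero-error runs."""
--     # streaks[0] is the length of the most recent zero-error segment (0 when the
--     # latest run had errors); older segment lengths follow, most recent first.
--     streaks = [0]
--     for run in history:
--         if run.get("error_count", 0) == 0:
--             streaks[0] += 1
--         else:
--             streaks.insert(0, 0)
--     return streaks[0], max(streaks)
-- ===== Notes on version B (the rewrite author's own statement) =====
-- stated objective: alternative
-- what changed: Replaces A's two loops (a reversed break-loop for the current streak plus a forward running-max loop for the best) by a single forward pass that builds the list of zero-error segment lengths (most recent first) and returns its head and its max.
import Mathlib
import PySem

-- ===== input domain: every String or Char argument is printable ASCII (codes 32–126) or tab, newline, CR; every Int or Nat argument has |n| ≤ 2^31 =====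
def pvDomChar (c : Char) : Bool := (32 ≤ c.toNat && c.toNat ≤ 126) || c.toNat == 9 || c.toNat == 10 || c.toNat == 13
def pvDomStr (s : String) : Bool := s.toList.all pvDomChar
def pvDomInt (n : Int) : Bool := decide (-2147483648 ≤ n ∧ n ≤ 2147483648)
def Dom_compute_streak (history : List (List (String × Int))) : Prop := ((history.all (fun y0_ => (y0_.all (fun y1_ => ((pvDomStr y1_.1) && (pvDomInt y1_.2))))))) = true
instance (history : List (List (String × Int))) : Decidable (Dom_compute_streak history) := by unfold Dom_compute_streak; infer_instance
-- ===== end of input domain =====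

-- B replaces A's two loops (a reversed break-loop plus a running-max loop) by one pass
-- that collects the zero-error segment lengths and reads off head / max (objective: alternative).

-- port of `run.get("error_count", 0) == 0` (used verbatim by both Pythons)
def pvIsZeroRun (run : List (String × Int)) : Bool :=
  PySem.Dict.getD (PySem.Dict.mk run) "error_count" 0 == 0

-- ===== PORT A =====
-- `for run in reversed(history): if …: current += 1 else: break`
def pvCurLoop : List (List (String × Int)) → Int → Int
  | [], current => current
  | run :: rest, current =>
      if pvIsZeroRun run then pvCurLoop rest (current + 1) else current

-- body of A's second loop over (streak, best)
def pvStepA (sb : Int × Int) (run : List (String × Int)) : Int × Int :=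
  if pvIsZeroRun run then (sb.1 + 1, max sb.2 (sb.1 + 1)) else (0, sb.2)

def compute_streak (history : List (List (String × Int))) : Int × Int :=
  let current := pvCurLoop history.reverse 0
  let sb := history.foldl pvStepA (0, 0)
  (current, sb.2)

-- ===== PORT B =====
-- body of B's loop over `streaks`; `[]` is unreachable (streaks starts as [0] and never shrinks;
-- Python's `streaks[0] += 1` would raise there)
def pvStepB (streaks : List Int) (run : List (String × Int)) : List Int :=
  if pvIsZeroRun run then
    match streaks with
    | s :: rest => (s + 1) :: rest
    | [] => []
  else 0 :: streaks

def compute_streak_alt (history : List (List (String × Int))) : Int × Int :=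
  let streaks := history.foldl pvStepB [0]
  -- streaks[0] and max(streaks): streaks is never empty, so the `.getD 0` defaults are unreachable
  (streaks.headD 0, (PySem.List.max? streaks (fun x => x)).getD 0)

-- ===== PRECONDITION & SPEC =====
def Spec_compute_streak (history : List (List (String × Int))) (out : Int × Int) : Prop := out = compute_streak_alt history
instance (history : List (List (String × Int))) (out : Int × Int) : Decidable (Spec_compute_streak history out) := by unfold Spec_compute_streak; infer_instance

-- ===== CLAIM (what is proved, stated in full; the proofs are below) =====
def Claim_equal_compute_streak : Prop := ∀ (history : List (List (String × Int))), Dom_compute_streak history → Spec_compute_streak history (compute_streak history)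

-- ===== LEMMAS AND PROOFS =====

lemma pvCurLoop_acc (rs : List (List (String × Int))) : ∀ c, pvCurLoop rs c = c + pvCurLoop rs 0 := by
  induction rs with
  | nil => intro c; simp [pvCurLoop]
  | cons r rest ih =>
      intro c
      by_cases h : pvIsZeroRun r = true <;> simp [pvCurLoop, h, ih (c + 1), ih 1] <;> try ring

lemma pvFoldlMaxMax (t : List Int) : ∀ a c : Int, t.foldl max (max a c) = max (t.foldl max a) c := by
  induction t with
  | nil => intro a c; simp
  | cons x rest ih =>
      intro a c
      simp only [List.foldl_cons]
      rw [max_right_comm a c x, ih]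

lemma pv_invariant (history : List (List (String × Int))) :
    ∃ h t, history.foldl pvStepB [0] = h :: t ∧ 0 ≤ h ∧
      pvCurLoop history.reverse 0 = h ∧
      (history.foldl pvStepA (0, 0)).1 = h ∧
      (history.foldl pvStepA (0, 0)).2 = t.foldl max h := by
  induction history using List.reverseRecOn with
  | nil => exact ⟨0, [], rfl, le_refl 0, rfl, rfl, rfl⟩
  | append_singleton l x ih =>
      obtain ⟨h, t, e1, hnn, e2, e3, e4⟩ := ih
      rw [List.foldl_append, List.foldl_append, e1, List.reverse_append]
      by_cases hx : pvIsZeroRun x = true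
      · refine ⟨h + 1, t, by simp [pvStepB, hx], by omega, ?_, ?_, ?_⟩
        · simp only [List.reverse_cons, List.reverse_nil, List.nil_append,
            List.singleton_append, pvCurLoop, hx, if_pos]
          rw [pvCurLoop_acc _ (0 + 1), e2]; ring
        · simp [pvStepA, hx, e3]
        · simp only [List.foldl_cons, List.foldl_nil, pvStepA, hx, if_pos, e3, e4]
          rw [← max_eq_right (show h ≤ h + 1 by omega), pvFoldlMaxMax,
            max_eq_right (show h ≤ h + 1 by omega)]
      · refine ⟨0, h :: t, by simp [pvStepB, hx], le_refl 0, ?_, ?_, ?_⟩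
        · simp [pvCurLoop, hx]
        · simp [pvStepA, hx]
        · simp only [List.foldl_cons, List.foldl_nil, pvStepA, hx, if_neg, Bool.not_eq_true, e4]
          rw [show (max (0:Int) h) = max h 0 by omega, pvFoldlMaxMax]
          have := PySem.List.le_foldl_max t h
          omega

-- ===== VERDICT (by name: the statement is the Claim_ definition above) =====
theorem compute_streak_spec : Claim_equal_compute_streak := by
  intro history _
  obtain ⟨h, t, e1, _, e2, _, e4⟩ := pv_invariant history
  simp only [Spec_compute_streak, compute_streak, compute_streak_alt, e1, e2, e4,
    PySem.List.max?_id_cons, Option.getD_some, List.headD_cons]
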